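-- pv_equiv track=rewrite | github.com/cminahan/CPE101 | PROJECT3/funcs.py | find_horizontal_backwards
-- ===== SOURCE A (Python) =====
-- def find_horizontal_backwards(rows, word):
--     length = len(word)
--     final = 11 - length
--     tot = 0
--     start = 0
--     no = 'not in puzzle'
--     for row in range(10):
--         for index in range(final):
--             if rows[row][9-index] == word[0]:
--                 start = 9 - index
--                 for num in range(length):
--                     if rows[row][9 - index - num] == word[num]:
--                         tot += 1
--                 if tot == length:
--                     return True, "%s: (BACKWARD) row: %2d    column: %2d" %(word, row, start)
--                 else:
--                     start = 0
--                     tot = 0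
--     if start == 0:
--         return False, no
-- ===== SOURCE B (Python) =====
-- def find_horizontal_backwards(rows, word):
--     wl = list(word)
--     n = len(wl)
--     if n > 10:
--         return False, 'not in puzzle'
--     for rnum in range(10):
--         rr = [rows[rnum][9 - i] for i in range(10)]
--         for j in range(11 - n):
--             if rr[j:j + n] == wl:
--                 return True, "%s: (BACKWARD) row: %2d    column: %2d" % (word, rnum, 9 - j)
--     return False, 'not in puzzle'
-- ===== Notes on version B (the rewrite author's own statement) =====
-- stated objective: simpler
-- what changed: B replaces A's sentinel-plus-counter triple loop (first-char probe at column 9-index, then a full re-count of matching characters and a tot==length test) by reversing each row's first ten cells once and comparing one slice against the word's character list per candidate column.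
import Mathlib
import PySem

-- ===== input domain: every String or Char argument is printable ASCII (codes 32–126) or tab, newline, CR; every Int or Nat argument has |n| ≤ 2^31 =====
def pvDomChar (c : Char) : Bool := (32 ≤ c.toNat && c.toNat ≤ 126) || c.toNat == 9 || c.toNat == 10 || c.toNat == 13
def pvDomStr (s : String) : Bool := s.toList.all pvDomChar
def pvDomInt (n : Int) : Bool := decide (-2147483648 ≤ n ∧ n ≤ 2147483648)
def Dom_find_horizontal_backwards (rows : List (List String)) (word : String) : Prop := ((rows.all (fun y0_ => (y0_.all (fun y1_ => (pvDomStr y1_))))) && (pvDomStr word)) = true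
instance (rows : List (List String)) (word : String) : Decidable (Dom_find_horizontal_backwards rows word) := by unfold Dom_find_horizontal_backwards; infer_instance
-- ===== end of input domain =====

-- B scans each of the first ten rows reversed and compares a slice against the character
-- list of the word, replacing A's sentinel-plus-counter triple loop; objective: simpler.

-- %2d formatting: pad the decimal representation to width 2 with a leading space
def pvFmt2 (n : Int) : String :=
  let s := PySem.Int.toStr n
  if s.toList.length < 2 then " " ++ s else s

-- "%s: (BACKWARD) row: %2d    column: %2d" % (word, row, start)
def pvMsg (word : String) (row start : Int) : String :=
  word ++ ": (BACKWARD) row: " ++ pvFmt2 row ++ "    column: " ++ pvFmt2 start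

-- ===== PORT A =====
-- rows[row][i] (two chained subscripts; none = IndexError, excluded by Pre_)
def fhbCell (rows : List (List String)) (row i : Int) : Option String :=
  (PySem.List.pyGet? rows row).bind (fun r => PySem.List.pyGet? r i)

-- 'cell == word[num]' — both subscripts must have succeeded (Pre_ guarantees it)
def fhbEq (cell : Option String) (wc : Option Char) : Bool :=
  match cell, wc with
  | some s, some c => s == String.ofList [c]
  | _, _ => false

-- inner 'for index in range(final)' loop of A, with early return as Option
def fhbIdx (rows : List (List String)) (wl : List Char) (word : String) (row : Int) :
    List Int → Option (Bool × String)
  | [] => none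
  | index :: rest =>
    if fhbEq (fhbCell rows row (9 - index)) (PySem.List.pyGet? wl 0) then
      -- start = 9 - index; tot = the counting loop 'for num in range(length)'
      if ((PySem.List.pyRange 0 (wl.length : Int) 1).foldl
            (fun tot num =>
              if fhbEq (fhbCell rows row (9 - index - num)) (PySem.List.pyGet? wl num)
              then tot + 1 else tot) 0) = (wl.length : Int) then
        some (true, pvMsg word row (9 - index))
      else fhbIdx rows wl word row rest
    else fhbIdx rows wl word row rest

-- outer 'for row in range(10)' loop of A
def fhbRows (rows : List (List String)) (wl : List Char) (word : String) :
    List Int → Bool × String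
  | [] => (false, "not in puzzle")
  | row :: rest =>
    match fhbIdx rows wl word row (PySem.List.pyRange 0 (11 - (wl.length : Int)) 1) with
    | some res => res
    | none => fhbRows rows wl word rest

def find_horizontal_backwards (rows : List (List String)) (word : String) : Bool × String :=
  fhbRows rows word.toList word (PySem.List.pyRange 0 10 1)

-- ===== PORT B =====
-- "rr = [rows[rnum][9 - i] for i in range(10)]" of B (pyGet?: none = IndexError, excluded by Pre_)
def fhbAltRev (rows : List (List String)) (rnum : Nat) : List (Option String) :=
  (List.range 10).map
    (fun (i : Nat) => (PySem.List.pyGet? rows (rnum : Int)).bind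
      (fun r => PySem.List.pyGet? r ((9 : Int) - (i : Int))))

-- "for j in range(11 - n): if rr[j:j+n] == wl: ..." of B
def fhbAltScan (wl : List Char) (rr : List (Option String)) : Option Nat :=
  (List.range (11 - wl.length)).findSome?
    (fun j => if (rr.drop j).take wl.length == wl.map (fun c => some (String.ofList [c])) then some j else none)

-- "for rnum in range(10)" of B, with the rows still to visit counted by fuel
def fhbAltLoop (rows : List (List String)) (word : String) (wl : List Char) (rnum : Nat) :
    Nat → Bool × String
  | 0 => (false, "not in puzzle")
  | fuel + 1 =>
    match fhbAltScan wl (fhbAltRev rows rnum) with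
    | some j => (true, pvMsg word (rnum : Int) (9 - (j : Int)))
    | none => fhbAltLoop rows word wl (rnum + 1) fuel

def find_horizontal_backwards_alt (rows : List (List String)) (word : String) : Bool × String :=
  if word.toList.length > 10 then (false, "not in puzzle")
  else fhbAltLoop rows word word.toList 0 10

-- ===== PRECONDITION & SPEC =====
-- Pre_ excludes the inputs on which A raises IndexError: an empty word (word[0]), and — when the
-- word fits (length ≤ 10), so the scan actually subscripts the grid — fewer than 10 rows or a row
-- among the first 10 with fewer than 10 cells.  On a defective grid A can still return when a match
-- occurs before the defect is reached; B agrees there (see cites).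
def Pre_find_horizontal_backwards (rows : List (List String)) (word : String) : Prop :=
  1 ≤ word.toList.length ∧
  (word.toList.length ≤ 10 →
    10 ≤ rows.length ∧ ∀ r ∈ rows.take 10, 10 ≤ r.length)
instance (rows : List (List String)) (word : String) : Decidable (Pre_find_horizontal_backwards rows word) := by unfold Pre_find_horizontal_backwards; infer_instance

def pvWitness_find_horizontal_backwards : List (List String) × String :=
  ([["d","o","g"," "," "," "," "," "," "," "],
    [" "," "," "," "," "," "," "," "," "," "],
    [" "," "," "," "," "," "," "," "," "," "],
    [" "," "," "," "," "," "," "," "," "," "],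
    [" "," "," "," "," "," "," "," "," "," "],
    [" "," "," "," "," "," "," "," "," "," "],
    [" "," "," "," "," "," "," "," "," "," "],
    [" "," "," "," "," "," "," "," "," "," "],
    [" "," "," "," "," "," "," "," "," "," "],
    [" "," "," "," "," "," "," "," "," "," "]], "god")

def Spec_find_horizontal_backwards (rows : List (List String)) (word : String) (out : Bool × String) : Prop := out = find_horizontal_backwards_alt rows word
instance (rows : List (List String)) (word : String) (out : Bool × String) : Decidable (Spec_find_horizontal_backwards rows word out) := by unfold Spec_find_horizontal_backwards; infer_instance

-- ===== CLAIM (what is proved, stated in full; the proofs are below) =====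
def Claim_equal_find_horizontal_backwards : Prop := ∀ (rows : List (List String)) (word : String), Dom_find_horizontal_backwards rows word → Pre_find_horizontal_backwards rows word → Spec_find_horizontal_backwards rows word (find_horizontal_backwards rows word)

-- ===== LEMMAS AND PROOFS =====

-- long word (> 10): A's inner range is empty, every row yields none
theorem fhbRows_long (rows : List (List String)) (wl : List Char) (word : String)
    (hn : 11 ≤ wl.length) : ∀ l, fhbRows rows wl word l = (false, "not in puzzle") := by
  intro l
  induction l with
  | nil => rfl
  | cons row rest ih =>
    have : PySem.List.pyRange 0 (11 - (wl.length : Int)) 1 = [] :=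
      PySem.List.pyRange_one_eq_nil (by omega)
    simp [fhbRows, this, fhbIdx, ih]

-- one cell comparison of A, as a statement about the row's entries
theorem cell_iff (rows : List (List String)) (r : List String) (k : Int)
    (hget : PySem.List.pyGet? rows k = some r)
    (wl : List Char) (i num : Nat) (hi : i < r.length) (hnum : num < wl.length) :
    ((fhbEq (fhbCell rows k (i : Int)) (PySem.List.pyGet? wl (num : Int))) = true ↔
      r.getD i "" = String.ofList [wl.getD num 'x']) := by
  rw [fhbCell, hget, Option.bind_some, PySem.List.pyGet?_natCast, PySem.List.pyGet?_natCast]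
  rw [List.getElem?_eq_getElem hi, List.getElem?_eq_getElem hnum]
  rw [List.getD_eq_getElem _ _ hi, List.getD_eq_getElem _ _ hnum]
  simp [fhbEq]

-- the slice comparison of B, pointwise
theorem slice_iff (r : List String) (hr : 10 ≤ r.length) (wl : List Char) (j : Nat)
    (hj : j + wl.length ≤ 10) :
    ((((r.take 10).reverse.drop j).take wl.length) = wl.map (fun c => String.ofList [c])) ↔
    (∀ num, num < wl.length → r.getD (9 - j - num) "" = String.ofList [wl.getD num 'x']) := by
  have hrr : ((r.take 10).reverse).length = 10 := by
    simp [List.length_reverse, List.length_take]; omega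
  have hLlen : (((r.take 10).reverse.drop j).take wl.length).length = wl.length := by
    simp [List.length_take, List.length_drop, hrr]; omega
  constructor
  · intro h num hnum
    have := congrArg (fun l => l.getD num "") h
    simp only at this
    rw [List.getD_eq_getElem _ _ (by rw [hLlen]; exact hnum)] at this
    rw [List.getD_eq_getElem _ _ (by simp only [List.length_map]; exact hnum)] at this
    rw [List.getElem_take, List.getElem_drop, List.getElem_reverse, List.getElem_map] at this
    rw [List.getElem_take] at this
    have hidx : (List.take 10 r).length - 1 - (j + num) = 9 - j - num := by
      simp [List.length_take]; omega
    simp only [hidx] at this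
    rw [List.getD_eq_getElem _ _ (by omega), List.getD_eq_getElem _ _ hnum]
    exact this
  · intro h
    apply List.ext_getElem (by rw [hLlen]; simp)
    intro i h1 h2
    rw [List.getElem_take, List.getElem_drop, List.getElem_reverse, List.getElem_map]
    rw [List.getElem_take]
    have hi : i < wl.length := by rw [hLlen] at h1; exact h1
    have := h i hi
    rw [List.getD_eq_getElem _ _ (by omega), List.getD_eq_getElem _ _ hi] at this
    have hidx : (List.take 10 r).length - 1 - (j + i) = 9 - j - i := by
      simp [List.length_take]; omega
    simp only [hidx]
    exact this

-- A's counting loop reaches tot = length iff every position matches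
theorem tot_iff (rows : List (List String)) (r : List String) (k : Int)
    (hget : PySem.List.pyGet? rows k = some r) (hr : 10 ≤ r.length)
    (wl : List Char) (j : Nat) (hj : j + wl.length ≤ 10) :
    ((PySem.List.pyRange 0 (wl.length : Int) 1).foldl
        (fun tot num =>
          if fhbEq (fhbCell rows k (9 - (j : Int) - num)) (PySem.List.pyGet? wl num)
          then tot + 1 else tot) 0 = (wl.length : Int)) ↔
    (∀ num, num < wl.length → r.getD (9 - j - num) "" = String.ofList [wl.getD num 'x']) := by
  have hp : ∀ (num : Nat), num < wl.length →
      ((fhbEq (fhbCell rows k (9 - (j : Int) - (num : Int))) (PySem.List.pyGet? wl (num : Int))) = true ↔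
        r.getD (9 - j - num) "" = String.ofList [wl.getD num 'x']) := by
    intro num hnum
    have h9 : (9 - (j : Int) - (num : Int)) = ((9 - j - num : Nat) : Int) := by omega
    rw [h9]
    exact cell_iff rows r k hget wl (9 - j - num) num (by omega) hnum
  rw [PySem.List.foldl_if_add_one, zero_add]
  have hlen : (PySem.List.pyRange 0 (wl.length : Int) 1).length = wl.length := by
    rw [PySem.List.length_pyRange_one]; omega
  rw [show ((wl.length : Int)) = ((wl.length : Nat) : Int) from rfl, Nat.cast_inj]
  have hcp := List.countP_eq_length
    (p := fun num => fhbEq (fhbCell rows k (9 - (j : Int) - num)) (PySem.List.pyGet? wl num))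
    (l := PySem.List.pyRange 0 (wl.length : Int) 1)
  constructor
  · intro h num hnum
    have hall := hcp.1 (by rw [hlen]; exact h)
    have := hall (num : Int) (by rw [PySem.List.mem_pyRange_one]; omega)
    exact (hp num hnum).1 this
  · intro h
    conv_rhs => rw [← hlen]
    apply hcp.2
    intro a ha
    rw [PySem.List.mem_pyRange_one] at ha
    have hnum : a.toNat < wl.length := by omega
    have := (hp a.toNat hnum).2 (h a.toNat hnum)
    simpa [Int.toNat_of_nonneg ha.1] using this

-- the inner scans agree, index by index
theorem scan_eq (rows : List (List String)) (r : List String) (k : Int)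
    (hget : PySem.List.pyGet? rows k = some r) (hr : 10 ≤ r.length)
    (wl : List Char) (word : String) (hn1 : 1 ≤ wl.length) (hn10 : wl.length ≤ 10) :
    ∀ (cnt a : Nat), a + cnt = 11 - wl.length →
    fhbIdx rows wl word k ((List.range' a cnt).map (fun (j : Nat) => (j : Int))) =
    (((List.range' a cnt).findSome?
        (fun (j : Nat) => if ((((r.take 10).reverse.drop j).take wl.length) == wl.map (fun c => String.ofList [c])) = true then some j else none) : Option Nat)).map
      (fun (j : Nat) => (true, pvMsg word k (9 - (j : Int)))) := by
  intro cnt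
  induction cnt with
  | zero => intro a ha; rfl
  | succ m ih =>
    intro a ha
    have hj : a + wl.length ≤ 10 := by omega
    rw [List.range'_succ]
    simp only [List.map_cons, List.findSome?_cons]
    have hslice := slice_iff r hr wl a hj
    have htot := tot_iff rows r k hget hr wl a hj
    have h0 : (fhbEq (fhbCell rows k (9 - (a : Int))) (PySem.List.pyGet? wl 0) = true) ↔
        r.getD (9 - a - 0) "" = String.ofList [wl.getD 0 'x'] := by
      have h9 : (9 - (a : Int)) = ((9 - a - 0 : Nat) : Int) := by omega
      have h00 : (0 : Int) = ((0 : Nat) : Int) := rfl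
      rw [h9, h00]
      exact cell_iff rows r k hget wl (9 - a - 0) 0 (by omega) (by omega)
    by_cases hsl : (((r.take 10).reverse.drop a).take wl.length) = wl.map (fun c => String.ofList [c])
    · -- full match at column 9 - a: both return here
      have hall := hslice.1 hsl
      have hc0 : fhbEq (fhbCell rows k (9 - (a : Int))) (PySem.List.pyGet? wl 0) = true :=
        h0.2 (hall 0 (by omega))
      simp only [fhbIdx, hc0, if_true]
      rw [if_pos (htot.2 hall)]
      simp [hsl]
    · -- no match at column 9 - a: both skip to the next column
      have hskip : (if ((((r.take 10).reverse.drop a).take wl.length) == wl.map (fun c => String.ofList [c])) = true then some a else none) = none := by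
        simp [beq_iff_eq, hsl]
      rw [hskip]
      by_cases hc0 : fhbEq (fhbCell rows k (9 - (a : Int))) (PySem.List.pyGet? wl 0) = true
      · simp only [fhbIdx, hc0, if_true]
        rw [if_neg (fun htoteq => hsl (hslice.2 (htot.1 htoteq)))]
        exact ih (a + 1) (by omega)
      · simp only [fhbIdx, hc0]
        simp only [Bool.false_eq_true, if_false]
        exact ih (a + 1) (by omega)

-- under Pre_, B's reversed-row comprehension is the reverse of the row's first ten cells
theorem rev_eq (rows : List (List String)) (r : List String) (knat : Nat)
    (hget : PySem.List.pyGet? rows ((knat : Nat) : Int) = some r) (hr : 10 ≤ r.length) :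
    fhbAltRev rows knat = ((r.take 10).reverse).map some := by
  have hrr : ((r.take 10).reverse).length = 10 := by
    simp [List.length_reverse, List.length_take]; omega
  apply List.ext_getElem (by simp [fhbAltRev]; omega)
  intro i h1 h2
  have hi : i < 10 := by simpa [fhbAltRev] using h1
  simp only [fhbAltRev, List.getElem_map, List.getElem_range]
  rw [hget, Option.bind_some]
  have h9 : ((9 : Int) - (i : Int)) = (((9 - i : Nat)) : Int) := by omega
  rw [h9, PySem.List.pyGet?_natCast, List.getElem?_eq_getElem (by omega)]
  congr 1
  rw [List.getElem_reverse, List.getElem_take]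
  congr 1
  simp [List.length_take]; omega

-- the row loops agree
theorem rows_eq (rows : List (List String)) (wl : List Char) (word : String)
    (hn1 : 1 ≤ wl.length) (hn10 : wl.length ≤ 10)
    (hlen : 10 ≤ rows.length) (hsh : ∀ r ∈ rows.take 10, 10 ≤ r.length) :
    ∀ (m knat : Nat), knat + m = 10 →
    fhbRows rows wl word (PySem.List.pyRange (knat : Int) 10 1) =
    fhbAltLoop rows word wl knat m := by
  intro m
  induction m with
  | zero =>
    intro knat hk
    have : PySem.List.pyRange (knat : Int) 10 1 = [] :=
      PySem.List.pyRange_one_eq_nil (by omega)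
    rw [this]
    rfl
  | succ m ih =>
    intro knat hk
    have hklt : knat < rows.length := by omega
    have hr : 10 ≤ rows[knat].length := by
      apply hsh
      have : (rows.take 10)[knat]'(by simp [List.length_take]; omega) = rows[knat] :=
        List.getElem_take
      rw [← this]
      exact List.getElem_mem _
    have hget : PySem.List.pyGet? rows ((knat : Nat) : Int) = some rows[knat] := by
      rw [PySem.List.pyGet?_natCast, List.getElem?_eq_getElem hklt]
    have hcons : PySem.List.pyRange (knat : Int) 10 1 =
        (knat : Int) :: PySem.List.pyRange ((knat : Int) + 1) 10 1 :=
      PySem.List.pyRange_one_cons (by omega)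
    rw [hcons]
    rw [fhbRows, fhbAltLoop]
    have hconv : PySem.List.pyRange 0 (11 - (wl.length : Int)) 1 =
        (List.range' 0 (11 - wl.length)).map (fun (j : Nat) => (j : Int)) := by
      rw [PySem.List.pyRange_one]
      have : ((11 : Int) - (wl.length : Int) - 0).toNat = 11 - wl.length := by omega
      rw [this, List.range_eq_range']
      exact List.map_congr_left (fun x _ => by omega)
    have hscan := scan_eq rows rows[knat] ((knat : Nat) : Int) hget hr wl word hn1 hn10
      (11 - wl.length) 0 (by omega)
    -- B's option-level slice test equals the string-level one of scan_eq
    have hfun : (fun (j : Nat) =>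
          if ((fhbAltRev rows knat).drop j).take wl.length == wl.map (fun c => some (String.ofList [c])) then some j else none) =
        (fun (j : Nat) =>
          if (((((rows[knat].take 10).reverse.drop j).take wl.length) == wl.map (fun c => String.ofList [c])) = true) then some j else none) := by
      funext j
      rw [rev_eq rows rows[knat] knat hget hr]
      rw [← List.map_drop, ← List.map_take]
      rw [show (wl.map (fun c => some (String.ofList [c]))) = (wl.map (fun c => String.ofList [c])).map some by
        rw [List.map_map]; rfl]
      rcases eq_or_ne ((((rows[knat].take 10).reverse.drop j).take wl.length))
          (wl.map (fun c => String.ofList [c])) with h | h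
      · simp [h]
      · have h2 : ((((rows[knat].take 10).reverse.drop j).take wl.length)).map some ≠
            (wl.map (fun c => String.ofList [c])).map some :=
          fun hc => h ((List.map_injective_iff.2 (fun _ _ hh => Option.some.inj hh)) hc)
        have hb1 : (((((rows[knat].take 10).reverse.drop j).take wl.length)).map some ==
            (wl.map (fun c => String.ofList [c])).map some) = false := beq_eq_false_iff_ne.mpr h2
        have hb2 : (((((rows[knat].take 10).reverse.drop j).take wl.length)) ==
            wl.map (fun c => String.ofList [c])) = false := beq_eq_false_iff_ne.mpr h
        rw [hb1, hb2]
    rw [fhbAltScan, List.range_eq_range', hfun]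
    rw [hconv, hscan]
    cases hfs : (List.range' 0 (11 - wl.length)).findSome?
        (fun (j : Nat) => if ((((rows[knat].take 10).reverse.drop j).take wl.length) == wl.map (fun c => String.ofList [c])) = true then some j else none) with
    | none =>
      simp only [Option.map_none]
      have := ih (knat + 1) (by omega)
      have hcast : ((knat : Int) + 1) = (((knat + 1 : Nat)) : Int) := by omega
      rw [hcast]
      exact this
    | some j =>
      simp only [Option.map_some]

-- ===== VERDICT (by name: the statement is the Claim_ definition above) =====
theorem find_horizontal_backwards_spec : Claim_equal_find_horizontal_backwards := by
  intro rows word _ hpre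
  obtain ⟨hn1, hshape⟩ := hpre
  unfold Spec_find_horizontal_backwards find_horizontal_backwards find_horizontal_backwards_alt
  by_cases hn10 : word.toList.length ≤ 10
  · obtain ⟨hlen, hsh⟩ := hshape hn10
    rw [if_neg (by omega)]
    exact rows_eq rows word.toList word hn1 hn10 hlen hsh 10 0 rfl
  · rw [if_pos (by omega)]
    exact fhbRows_long rows word.toList word (by omega) _
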